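-- pv_equiv track=rewrite | github.com/Medic314/Light-Brite | test.py | rotate_and_mirror
-- ===== SOURCE A (Python) =====
-- def rotate_and_mirror(grid):
--     def rotate90_ccw(g):
--         rows = len(g)
--         cols = max((len(r) for r in g), default=0)
--         rotated = []
--         for y in range(cols):
--             new_row = []
--             for x in range(rows):
--                 if len(g[x]) > (cols - 1 - y):
--                     new_row.append(g[x][cols - 1 - y])
--                 else:
--                     new_row.append((0, 0, 0, 0))
--             rotated.append(new_row)
--         return rotated
--
--     rotated = grid
--     for _ in range(3):
--         rotated = rotate90_ccw(rotated)
--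
--
--     mirrored = [row[::-1] for row in rotated]
--     return mirrored
-- ===== SOURCE B (Python) =====
-- def rotate_and_mirror(grid):
--     rows = len(grid)
--     cols = max((len(r) for r in grid), default=0)
--     return [[grid[j][i] if i < len(grid[j]) else (0, 0, 0, 0) for j in range(rows)]
--             for i in range(cols)]
-- ===== Notes on version B (the rewrite author's own statement) =====
-- stated objective: simpler
-- what changed: B replaces the three 90-degree-CCW rotation passes plus a row-mirror pass by a single direct build of the padded transpose (result[i][j] = grid[j][i] or the zero pad), one pass instead of four.
import Mathlib
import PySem

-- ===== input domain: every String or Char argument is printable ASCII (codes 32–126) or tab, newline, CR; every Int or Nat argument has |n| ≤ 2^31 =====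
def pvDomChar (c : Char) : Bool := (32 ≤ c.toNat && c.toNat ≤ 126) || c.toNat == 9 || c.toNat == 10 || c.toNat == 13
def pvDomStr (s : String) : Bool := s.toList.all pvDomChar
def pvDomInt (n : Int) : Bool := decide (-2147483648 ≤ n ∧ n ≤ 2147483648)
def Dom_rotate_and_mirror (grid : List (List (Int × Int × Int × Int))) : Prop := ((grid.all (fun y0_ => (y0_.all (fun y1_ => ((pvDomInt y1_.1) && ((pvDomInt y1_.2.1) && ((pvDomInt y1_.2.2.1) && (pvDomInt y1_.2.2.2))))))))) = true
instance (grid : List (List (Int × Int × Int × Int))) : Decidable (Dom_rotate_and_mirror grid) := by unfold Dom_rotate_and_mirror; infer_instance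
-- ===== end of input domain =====

-- B builds the padded transpose directly in one pass instead of A's three CCW rotations plus a mirror pass (objective: simpler).

-- ===== PORT A =====
-- max((len(r) for r in g), default=0): running max over the row lengths, exact.
def pvMaxLen (g : List (List (Int × Int × Int × Int))) : Nat :=
  (g.map List.length).foldl max 0

-- rotate90_ccw: the two nested range loops; g[x] is always in range (x < len g), so getD is exact;
-- g[x][cols-1-y] is guarded by the length test, so getD is exact there too.
def pvRot90ccw (g : List (List (Int × Int × Int × Int))) : List (List (Int × Int × Int × Int)) :=
  let rows := g.length
  let cols := pvMaxLen g
  (List.range cols).map (fun y =>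
    (List.range rows).map (fun x =>
      if ((g.getD x []).length > cols - 1 - y) then (g.getD x []).getD (cols - 1 - y) (0, 0, 0, 0)
      else (0, 0, 0, 0)))

-- three rotations, then mirrored = [row[::-1] for row in rotated]  (row[::-1] is List.reverse, exact)
def rotate_and_mirror (grid : List (List (Int × Int × Int × Int))) : List (List (Int × Int × Int × Int)) :=
  (pvRot90ccw (pvRot90ccw (pvRot90ccw grid))).map (fun row => row.reverse)

-- ===== PORT B =====
-- one direct build of the padded transpose; grid[j] is in range (j < rows), grid[j][i] guarded, so getD exact
def rotate_and_mirror_alt (grid : List (List (Int × Int × Int × Int))) : List (List (Int × Int × Int × Int)) :=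
  let rows := grid.length
  let cols := pvMaxLen grid
  (List.range cols).map (fun i =>
    (List.range rows).map (fun j =>
      if i < (grid.getD j []).length then (grid.getD j []).getD i (0, 0, 0, 0)
      else (0, 0, 0, 0)))

-- ===== PRECONDITION & SPEC =====
def Spec_rotate_and_mirror (grid : List (List (Int × Int × Int × Int))) (out : List (List (Int × Int × Int × Int))) : Prop := out = rotate_and_mirror_alt grid
instance (grid : List (List (Int × Int × Int × Int))) (out : List (List (Int × Int × Int × Int))) : Decidable (Spec_rotate_and_mirror grid out) := by unfold Spec_rotate_and_mirror; infer_instance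

-- ===== CLAIM (what is proved, stated in full; the proofs are below) =====
def Claim_equal_rotate_and_mirror : Prop := ∀ (grid : List (List (Int × Int × Int × Int))), Dom_rotate_and_mirror grid → Spec_rotate_and_mirror grid (rotate_and_mirror grid)

-- ===== LEMMAS AND PROOFS =====

-- the padded cell g[x][y] (zero tuple when out of range)
def pvCell (g : List (List (Int × Int × Int × Int))) (x y : Nat) : (Int × Int × Int × Int) :=
  if y < (g.getD x []).length then (g.getD x []).getD y (0, 0, 0, 0) else (0, 0, 0, 0)

-- an m×n grid from an entry function
def pvMkGrid (m n : Nat) (f : Nat → Nat → (Int × Int × Int × Int)) : List (List (Int × Int × Int × Int)) :=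
  (List.range m).map (fun y => (List.range n).map (fun x => f y x))

theorem pv_foldl_max_const {l : List Nat} {L : Nat} (hl : l ≠ []) (h : ∀ x ∈ l, x = L) (a : Nat) :
    l.foldl max a = max a L := by
  induction l generalizing a with
  | nil => simp_all
  | cons b t ih =>
    have hb : b = L := h b (by simp)
    cases t with
    | nil => simp [hb]
    | cons c u =>
      rw [List.foldl_cons, hb,
        ih (by simp) (fun x hx => h x (by simp [List.mem_cons] at hx ⊢; tauto))]
      omega

theorem pvMkGrid_length (m n : Nat) (f : Nat → Nat → (Int × Int × Int × Int)) :
    (pvMkGrid m n f).length = m := by simp [pvMkGrid]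

theorem pvMkGrid_getD {m n : Nat} {f : Nat → Nat → (Int × Int × Int × Int)} {y : Nat} (hy : y < m) :
    (pvMkGrid m n f).getD y [] = (List.range n).map (f y) := by
  simp [pvMkGrid, List.getD_eq_getElem?_getD, hy]

theorem pvMaxLen_mkGrid {m n : Nat} (hm : 0 < m) (f : Nat → Nat → (Int × Int × Int × Int)) :
    pvMaxLen (pvMkGrid m n f) = n := by
  unfold pvMaxLen
  rw [pv_foldl_max_const (L := n)]
  · omega
  · simp [pvMkGrid]
    omega
  · intro x hx
    simp [pvMkGrid] at hx
    obtain ⟨a, _, ha⟩ := hx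
    omega

theorem pvCell_mkGrid {m n : Nat} {f : Nat → Nat → (Int × Int × Int × Int)} {x y : Nat}
    (hx : x < m) (hy : y < n) : pvCell (pvMkGrid m n f) x y = f x y := by
  unfold pvCell
  rw [pvMkGrid_getD hx]
  simp [List.getD_eq_getElem?_getD, hy]

theorem pvMkGrid_congr {m n : Nat} {f f' : Nat → Nat → (Int × Int × Int × Int)}
    (h : ∀ y < m, ∀ x < n, f y x = f' y x) : pvMkGrid m n f = pvMkGrid m n f' := by
  unfold pvMkGrid
  refine List.map_congr_left (fun y hy => ?_)
  refine List.map_congr_left (fun x hx => ?_)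
  exact h y (List.mem_range.mp hy) x (List.mem_range.mp hx)

-- the port's rotation, written as a grid of padded cells (definitional up to > vs <)
theorem pvRot_char (g : List (List (Int × Int × Int × Int))) :
    pvRot90ccw g = pvMkGrid (pvMaxLen g) g.length (fun y x => pvCell g x (pvMaxLen g - 1 - y)) := by
  simp only [pvRot90ccw, pvMkGrid, pvCell, gt_iff_lt]

theorem pvRot_mkGrid {m n : Nat} (hm : 0 < m) (f : Nat → Nat → (Int × Int × Int × Int)) :
    pvRot90ccw (pvMkGrid m n f) = pvMkGrid n m (fun y x => f x (n - 1 - y)) := by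
  rw [pvRot_char, pvMaxLen_mkGrid hm, pvMkGrid_length]
  refine pvMkGrid_congr (fun y hy x hx => ?_)
  exact pvCell_mkGrid hx (by omega)

theorem pv_reverse_map_range (n : Nat) (f : Nat → (Int × Int × Int × Int)) :
    ((List.range n).map f).reverse = (List.range n).map (fun x => f (n - 1 - x)) := by
  apply List.ext_getElem
  · simp
  · intro i h1 h2
    simp [List.getElem_reverse]

theorem pvMirror_mkGrid (m n : Nat) (f : Nat → Nat → (Int × Int × Int × Int)) :
    (pvMkGrid m n f).map (fun row => row.reverse) = pvMkGrid m n (fun y x => f y (n - 1 - x)) := by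
  unfold pvMkGrid
  rw [List.map_map]
  exact List.map_congr_left (fun y _ => pv_reverse_map_range n (f y))

theorem pvAlt_char (g : List (List (Int × Int × Int × Int))) :
    rotate_and_mirror_alt g = pvMkGrid (pvMaxLen g) g.length (fun i j => pvCell g j i) := by
  simp only [rotate_and_mirror_alt, pvMkGrid, pvCell]

theorem pv_main (g : List (List (Int × Int × Int × Int))) :
    rotate_and_mirror g = rotate_and_mirror_alt g := by
  by_cases hc : pvMaxLen g = 0
  · have h1 : pvRot90ccw g = [] := by
      rw [pvRot_char, hc]; simp [pvMkGrid]
    have h2 : pvRot90ccw ([] : List (List (Int × Int × Int × Int))) = [] := by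
      simp [pvRot90ccw, pvMaxLen]
    simp [rotate_and_mirror, h1, h2, pvAlt_char, hc, pvMkGrid]
  · have hc' : 0 < pvMaxLen g := Nat.pos_of_ne_zero hc
    have hr : 0 < g.length := by
      rcases g with _ | ⟨a, t⟩
      · simp [pvMaxLen] at hc
      · simp
    set c := pvMaxLen g with hcdef
    set r := g.length with hrdef
    have h1 : pvRot90ccw g = pvMkGrid c r (fun y x => pvCell g x (c - 1 - y)) := pvRot_char g
    have h2 : pvRot90ccw (pvRot90ccw g) =
        pvMkGrid r c (fun y x => pvCell g (r - 1 - y) (c - 1 - x)) := by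
      rw [h1, pvRot_mkGrid hc']
    have h3 : pvRot90ccw (pvRot90ccw (pvRot90ccw g)) =
        pvMkGrid c r (fun y x => pvCell g (r - 1 - x) (c - 1 - (c - 1 - y))) := by
      rw [h2, pvRot_mkGrid hr]
    rw [rotate_and_mirror, h3, pvMirror_mkGrid, pvAlt_char]
    refine pvMkGrid_congr (fun y hy x hx => ?_)
    have e1 : r - 1 - (r - 1 - x) = x := by omega
    have e2 : c - 1 - (c - 1 - y) = y := by omega
    simp only [e1, e2]

-- ===== VERDICT (by name: the statement is the Claim_ definition above) =====
theorem rotate_and_mirror_spec : Claim_equal_rotate_and_mirror := by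
  intro g _
  unfold Spec_rotate_and_mirror
  exact pv_main g
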